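-- pv_equiv track=rewrite | github.com/haoyuzhao123/One-Sided-MAB-Simulation | simu.py | revenue
-- ===== SOURCE A (Python) =====
-- def revenue(v,r):
--     a = 0
--     b = 0
--     for i in range(len(v)):
--         if v[i] > a:
--             b = a
--             a = v[i]
--         elif v[i] > b:
--             b = v[i]
--
--     res = [0] * len(r)
--     for i in range(len(r)):
--         if r[i] > a:
--             res[i] = 0
--         elif r[i] > b:
--             res[i] = r[i]
--         else:
--             res[i] = b
--
--     return res
-- ===== SOURCE B (Python) =====
-- def revenue(v, r):
--     s = sorted(list(v) + [0, 0], reverse=True)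
--     a, b = s[0], s[1]
--     return [0 if x > a else (x if x > b else b) for x in r]
-- ===== Notes on version B (the rewrite author's own statement) =====
-- stated objective: simpler
-- what changed: Replaces the manual branch-heavy top-two scan with sorting v plus two zero sentinels in descending order and reading off the first two elements, then a list comprehension over r.
import Mathlib
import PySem

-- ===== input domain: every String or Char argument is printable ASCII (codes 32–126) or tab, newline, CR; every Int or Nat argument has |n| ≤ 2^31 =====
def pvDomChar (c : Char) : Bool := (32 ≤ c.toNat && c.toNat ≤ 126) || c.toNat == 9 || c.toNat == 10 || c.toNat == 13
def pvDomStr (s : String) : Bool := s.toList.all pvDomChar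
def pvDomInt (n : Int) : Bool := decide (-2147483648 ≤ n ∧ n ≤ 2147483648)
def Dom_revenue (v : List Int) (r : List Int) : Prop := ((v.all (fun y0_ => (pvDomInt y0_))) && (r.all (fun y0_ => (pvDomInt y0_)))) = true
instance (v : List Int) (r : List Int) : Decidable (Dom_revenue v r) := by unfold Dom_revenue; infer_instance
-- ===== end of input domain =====

-- B replaces A's manual top-two scan by a descending sort of v with two zero sentinels (simpler structure, not faster).


-- ===== PORT A =====
-- A's first loop: running top-two (a, b) with strict comparisons, started at (0, 0).
def revStep (ab : Int × Int) (x : Int) : Int × Int :=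
  if x > ab.1 then (x, ab.1) else if x > ab.2 then (ab.1, x) else ab

def revenue (v : List Int) (r : List Int) : List Int :=
  let ab := v.foldl revStep (0, 0)
  r.map (fun x => if x > ab.1 then 0 else if x > ab.2 then x else ab.2)

-- ===== PORT B =====
def revenue_alt (v : List Int) (r : List Int) : List Int :=
  let s := PySem.List.sorted (v ++ [0, 0]) (fun x => x) true
  let a := s.getD 0 0
  let b := s.getD 1 0
  r.map (fun x => if x > a then 0 else if x > b then x else b)

-- ===== PRECONDITION & SPEC =====
def Spec_revenue (v : List Int) (r : List Int) (out : List Int) : Prop := out = revenue_alt v r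
instance (v : List Int) (r : List Int) (out : List Int) : Decidable (Spec_revenue v r out) := by unfold Spec_revenue; infer_instance

-- ===== CLAIM (what is proved, stated in full; the proofs are below) =====
def Claim_equal_revenue : Prop := ∀ (v : List Int) (r : List Int), Dom_revenue v r → Spec_revenue v r (revenue v r)

-- ===== LEMMAS AND PROOFS =====

theorem revStep_rcomm : ∀ (a : Int × Int) (x y : Int),
    revStep (revStep a x) y = revStep (revStep a y) x := by
  rintro ⟨a, b⟩ x y
  simp only [revStep]
  split_ifs <;> simp_all <;> omega

theorem revStep_inv (p : Int × Int) (x : Int) (h1 : 0 ≤ p.2) (h2 : p.2 ≤ p.1) :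
    0 ≤ (revStep p x).2 ∧ (revStep p x).2 ≤ (revStep p x).1 := by
  simp only [revStep]
  split_ifs <;> (try simp_all) <;> omega

theorem foldl_revStep_inv : ∀ (l : List Int) (p : Int × Int), 0 ≤ p.2 → p.2 ≤ p.1 →
    0 ≤ (l.foldl revStep p).2 ∧ (l.foldl revStep p).2 ≤ (l.foldl revStep p).1 := by
  intro l
  induction l with
  | nil => intro p h1 h2; exact ⟨h1, h2⟩
  | cons x t ih =>
    intro p h1 h2
    have h := revStep_inv p x h1 h2
    exact ih _ h.1 h.2

theorem revStep_zero (p : Int × Int) (h1 : 0 ≤ p.2) (h2 : p.2 ≤ p.1) : revStep p 0 = p := by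
  simp only [revStep]
  split_ifs <;> (try simp_all [Prod.ext_iff]) <;> omega

theorem foldl_sentinels (v : List Int) :
    (v ++ [0, 0]).foldl revStep (0, 0) = v.foldl revStep (0, 0) := by
  have h := foldl_revStep_inv v (0, 0) le_rfl le_rfl
  have e1 : revStep (v.foldl revStep (0, 0)) 0 = v.foldl revStep (0, 0) :=
    revStep_zero _ h.1 h.2
  simp [List.foldl_append, e1]

theorem foldl_revStep_const : ∀ (t : List Int) (a b : Int), (∀ x ∈ t, x ≤ b) → b ≤ a →
    t.foldl revStep (a, b) = (a, b) := by
  intro t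
  induction t with
  | nil => intros; rfl
  | cons x t ih =>
    intro a b hx hba
    have hx1 : x ≤ b := hx x (by simp)
    have e : revStep (a, b) x = (a, b) := by
      simp only [revStep]
      split_ifs <;> (try simp_all [Prod.ext_iff]) <;> omega
    simp only [List.foldl_cons, e]
    exact ih a b (fun y hy => hx y (by simp [hy])) hba

theorem fold_of_sorted_shape (s0 s1 : Int) (t : List Int)
    (h0 : 0 ≤ s1) (h1 : s1 ≤ s0) (ht : ∀ x ∈ t, x ≤ s1) :
    (s0 :: s1 :: t).foldl revStep (0, 0) = (s0, s1) := by
  have e0 : revStep (0, 0) s0 = (s0, 0) := by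
    simp only [revStep]
    split_ifs <;> (try simp_all [Prod.ext_iff]) <;> omega
  have e1 : revStep (s0, 0) s1 = (s0, s1) := by
    simp only [revStep]
    split_ifs <;> (try simp_all [Prod.ext_iff]) <;> omega
  simp only [List.foldl_cons, e0, e1]
  exact foldl_revStep_const t s0 s1 ht h1

theorem s1_nonneg (v : List Int) (s0 s1 : Int) (t : List Int)
    (hperm : (s0 :: s1 :: t).Perm (v ++ [0, 0]))
    (htail : ∀ x ∈ t, x ≤ s1) : 0 ≤ s1 := by
  by_contra h
  have hcount : (s0 :: s1 :: t).count 0 = (v ++ [0, 0]).count 0 := hperm.count_eq 0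
  have h2 : 2 ≤ (v ++ [0, 0]).count 0 := by
    rw [List.count_append]
    have : ([0, 0] : List Int).count 0 = 2 := by decide
    omega
  have hz : (s1 :: t).count 0 = 0 := by
    refine List.count_eq_zero.mpr ?_
    intro hmem
    rcases List.mem_cons.mp hmem with h' | h'
    · omega
    · have := htail 0 h'; omega
  have hle : (s0 :: s1 :: t).count 0 ≤ 1 := by
    rw [List.count_cons, hz]
    split <;> omega
  omega

theorem fold_eq_sorted (v : List Int) :
    v.foldl revStep (0, 0) =
      ((PySem.List.sorted (v ++ [0, 0]) (fun x => x) true).getD 0 0,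
       (PySem.List.sorted (v ++ [0, 0]) (fun x => x) true).getD 1 0) := by
  haveI : RightCommutative revStep := ⟨fun a x y => revStep_rcomm a x y⟩
  set s := PySem.List.sorted (v ++ [0, 0]) (fun x => x) true with hs
  have hperm : s.Perm (v ++ [0, 0]) := PySem.List.sorted_perm _ _ _
  have hpw : s.Pairwise (fun a b => b ≤ a) := by
    have := PySem.List.sorted_pairwise_rev (xs := v ++ [0, 0]) (key := fun x => x)
    simpa [hs] using this
  have hfold : (v ++ [0, 0]).foldl revStep (0, 0) = s.foldl revStep (0, 0) :=
    (hperm.symm.foldl_eq (0, 0))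
  rcases s with _ | ⟨s0, _ | ⟨s1, t⟩⟩
  · exfalso; have := hperm.length_eq; simp at this
  · exfalso; have := hperm.length_eq; simp at this
  · have hps := List.pairwise_cons.mp hpw
    have hps2 := List.pairwise_cons.mp hps.2
    have h1 : s1 ≤ s0 := hps.1 s1 (by simp)
    have htail : ∀ x ∈ t, x ≤ s1 := hps2.1
    have h0 : 0 ≤ s1 := s1_nonneg v s0 s1 t hperm htail
    have := fold_of_sorted_shape s0 s1 t h0 h1 htail
    rw [← foldl_sentinels, hfold, this]
    rfl

-- ===== VERDICT (by name: the statement is the Claim_ definition above) =====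
theorem revenue_spec : Claim_equal_revenue := by
  intro v r _
  unfold Spec_revenue revenue revenue_alt
  simp only [fold_eq_sorted v]
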